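-- pv_equiv track=rewrite | github.com/J0wsper/CSCI-121 | homework5/down_up.py | down_up
-- ===== SOURCE A (Python) =====
-- def down_up(n):
--     a = []
--     b = n
--     while n > 0:
--         a = a+[n]
--         n = n-1
--     n = 2
--     while n <= b:
--         a = a+[n]
--         n = n+1
--     return(a)
-- ===== SOURCE B (Python) =====
-- def down_up(n):
--     # Single arithmetic pass: the valley n,n-1,...,1,2,...,n is symmetric
--     # about index n-1, so element i is abs(i-(n-1))+1 for i in 0..2n-2.
--     return [abs(i - (n - 1)) + 1 for i in range(2 * n - 1)]
-- ===== Notes on version B (the rewrite author's own statement) =====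
-- stated objective: simpler
-- what changed: Replaced the two directional counting while-loops (each rebuilding the list with a+[n]) by a single comprehension over range(2n-1) using the closed-form element abs(i-(n-1))+1.
import Mathlib
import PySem

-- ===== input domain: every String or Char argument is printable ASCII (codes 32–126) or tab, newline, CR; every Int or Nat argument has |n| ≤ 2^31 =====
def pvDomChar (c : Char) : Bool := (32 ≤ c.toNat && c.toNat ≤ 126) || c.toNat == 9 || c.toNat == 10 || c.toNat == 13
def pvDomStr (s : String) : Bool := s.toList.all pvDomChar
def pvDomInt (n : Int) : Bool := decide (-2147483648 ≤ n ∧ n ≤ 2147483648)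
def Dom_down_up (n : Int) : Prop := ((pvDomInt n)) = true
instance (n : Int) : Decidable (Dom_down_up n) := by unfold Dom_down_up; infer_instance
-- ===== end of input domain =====

-- B replaces A's two counting while-loops by one map of the closed-form element
-- abs(i-(n-1))+1 over range(2n-1) (objective: simpler).

-- ===== PORT A =====
-- first while loop: while n > 0: a = a + [n]; n = n - 1
def downLoop (a : List Int) (n : Int) : List Int :=
  if _h : n > 0 then downLoop (a ++ [n]) (n - 1) else a
termination_by n.toNat
decreasing_by omega

-- second while loop: while n <= b: a = a + [n]; n = n + 1
def upLoop (b : Int) (a : List Int) (n : Int) : List Int :=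
  if _h : n ≤ b then upLoop b (a ++ [n]) (n + 1) else a
termination_by (b + 1 - n).toNat
decreasing_by omega

def down_up (n : Int) : List Int :=
  upLoop n (downLoop [] n) 2

-- ===== PORT B =====
-- return [abs(i - (n - 1)) + 1 for i in range(2 * n - 1)]
def down_up_alt (n : Int) : List Int :=
  (PySem.List.pyRange 0 (2 * n - 1) 1).map (fun i => |i - (n - 1)| + 1)

-- ===== PRECONDITION & SPEC =====
def Spec_down_up (n : Int) (out : List Int) : Prop := out = down_up_alt n
instance (n : Int) (out : List Int) : Decidable (Spec_down_up n out) := by unfold Spec_down_up; infer_instance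

-- ===== CLAIM (what is proved, stated in full; the proofs are below) =====
def Claim_equal_down_up : Prop := ∀ (n : Int), Dom_down_up n → Spec_down_up n (down_up n)

-- ===== LEMMAS AND PROOFS =====

theorem downLoop_append : ∀ (k : Nat) (n : Int), n.toNat = k →
    ∀ (a : List Int), downLoop a n = a ++ downLoop [] n := by
  intro k
  induction k with
  | zero =>
      intro n hk a
      conv_lhs => rw [downLoop]
      conv_rhs => rw [downLoop]
      simp [show ¬ n > 0 by omega]
  | succ t ih =>
      intro n hk a
      by_cases h : n > 0
      · conv_lhs => rw [downLoop]
        conv_rhs => rw [downLoop]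
        simp only [h, dite_true]
        rw [ih (n - 1) (by omega) (a ++ [n]), ih (n - 1) (by omega) ([] ++ [n])]
        simp
      · conv_lhs => rw [downLoop]
        conv_rhs => rw [downLoop]
        simp [h]

theorem downLoop_cons (n : Int) (h : n > 0) :
    downLoop [] n = n :: downLoop [] (n - 1) := by
  rw [downLoop]
  simp only [h, dite_true]
  rw [downLoop_append (n - 1).toNat (n - 1) rfl]
  simp

theorem downLoop_nil (n : Int) (h : ¬ n > 0) : downLoop [] n = [] := by
  rw [downLoop]; simp [h]

theorem upLoop_append : ∀ (k : Nat) (b n : Int), (b + 1 - n).toNat = k →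
    ∀ (a : List Int), upLoop b a n = a ++ upLoop b [] n := by
  intro k
  induction k with
  | zero =>
      intro b n hk a
      conv_lhs => rw [upLoop]
      conv_rhs => rw [upLoop]
      simp [show ¬ n ≤ b by omega]
  | succ t ih =>
      intro b n hk a
      by_cases h : n ≤ b
      · conv_lhs => rw [upLoop]
        conv_rhs => rw [upLoop]
        simp only [h, dite_true]
        rw [ih b (n + 1) (by omega) (a ++ [n]), ih b (n + 1) (by omega) ([] ++ [n])]
        simp
      · conv_lhs => rw [upLoop]
        conv_rhs => rw [upLoop]
        simp [h]

theorem upLoop_cons (b n : Int) (h : n ≤ b) :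
    upLoop b [] n = n :: upLoop b [] (n + 1) := by
  rw [upLoop]
  simp only [h, dite_true]
  rw [upLoop_append (b + 1 - (n + 1)).toNat b (n + 1) rfl]
  simp

theorem upLoop_nil (b n : Int) (h : ¬ n ≤ b) : upLoop b [] n = [] := by
  rw [upLoop]; simp [h]

-- extending the upper bound by one appends exactly [b]
theorem upLoop_succ_bound : ∀ (k : Nat) (b n : Int), (b + 1 - n).toNat = k → n ≤ b →
    upLoop b [] n = upLoop (b - 1) [] n ++ [b] := by
  intro k
  induction k with
  | zero => intro b n hk h; omega
  | succ t ih =>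
      intro b n hk h
      rw [upLoop_cons b n h]
      by_cases h2 : n ≤ b - 1
      · rw [upLoop_cons (b - 1) n h2]
        rw [ih b (n + 1) (by omega) (by omega)]
        simp
      · have hb : n = b := by omega
        subst hb
        rw [upLoop_nil n (n + 1) (by omega), upLoop_nil (n - 1) n h2]
        simp

-- A's result satisfies L n = n :: L (n-1) ++ [n] for n ≥ 2
theorem down_up_step (n : Int) (h : 2 ≤ n) :
    down_up n = n :: down_up (n - 1) ++ [n] := by
  unfold down_up
  conv_rhs => rw [upLoop_append ((n - 1) + 1 - 2).toNat (n - 1) 2 rfl (downLoop [] (n - 1))]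
  rw [downLoop_cons n (by omega),
      upLoop_append (n + 1 - 2).toNat n 2 rfl,
      upLoop_succ_bound (n + 1 - 2).toNat n 2 rfl h]
  simp

-- B's result in List.range form
theorem rhs_form (n : Int) :
    down_up_alt n = (List.range (2 * n - 1).toNat).map (fun k : Nat => |(k : Int) - (n - 1)| + 1) := by
  unfold down_up_alt
  rw [PySem.List.pyRange_one, List.map_map]
  norm_num [Function.comp]

-- B's result satisfies the same recurrence
theorem rhs_step (n : Int) (h : 2 ≤ n) :
    down_up_alt n = n :: down_up_alt (n - 1) ++ [n] := by
  rw [rhs_form n, rhs_form (n - 1)]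
  have hc : (2 * n - 1).toNat = ((2 * (n - 1) - 1).toNat + 1) + 1 := by omega
  rw [hc, List.range_succ, List.map_append, List.range_succ_eq_map, List.map_cons,
      List.map_map]
  have h0 : |((0 : Nat) : Int) - (n - 1)| + 1 = n := by
    push_cast
    rw [abs_of_nonpos (by omega)]
    ring
  have hmid : (List.range (2 * (n - 1) - 1).toNat).map
        ((fun k : Nat => |(k : Int) - (n - 1)| + 1) ∘ Nat.succ)
      = (List.range (2 * (n - 1) - 1).toNat).map (fun k : Nat => |(k : Int) - (n - 1 - 1)| + 1) := by
    apply List.map_congr_left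
    intro k _
    simp only [Function.comp_apply]
    have : ((Nat.succ k : Nat) : Int) - (n - 1) = (k : Int) - (n - 1 - 1) := by
      push_cast; ring
    rw [this]
  have hlast : |(((2 * (n - 1) - 1).toNat + 1 : Nat) : Int) - (n - 1)| + 1 = n := by
    have hcv : (((2 * (n - 1) - 1).toNat : Nat) : Int) = 2 * n - 3 := by omega
    push_cast [hcv]
    rw [abs_of_nonneg (by omega)]
    ring
  rw [hmid, h0]
  simp only [List.map_cons, List.map_nil]
  rw [hlast]

-- base cases
theorem down_up_nonpos (n : Int) (h : n ≤ 0) : down_up n = down_up_alt n := by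
  unfold down_up
  rw [downLoop_nil n (by omega), upLoop_nil n 2 (by omega)]
  unfold down_up_alt
  rw [PySem.List.pyRange_one_eq_nil (by omega)]
  simp

theorem down_up_one : down_up 1 = down_up_alt 1 := by
  unfold down_up
  rw [downLoop_cons 1 (by omega)]
  norm_num
  rw [downLoop_nil 0 (by omega),
      upLoop_append ((1 : Int) + 1 - 2).toNat 1 2 rfl [1],
      upLoop_nil 1 2 (by omega)]
  rw [rhs_form 1]
  norm_num [List.range_succ]

theorem main_eq : ∀ (m : Nat) (n : Int), n = (m : Int) → down_up n = down_up_alt n := by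
  intro m
  induction m with
  | zero => intro n hn; exact down_up_nonpos n (by omega)
  | succ t ih =>
      intro n hn
      by_cases ht : t = 0
      · subst ht
        have h1 : n = 1 := by omega
        subst h1
        exact down_up_one
      · have h2 : 2 ≤ n := by omega
        rw [down_up_step n h2, rhs_step n h2, ih (n - 1) (by omega)]

-- ===== VERDICT (by name: the statement is the Claim_ definition above) =====
theorem down_up_spec : Claim_equal_down_up := by
  intro n _
  unfold Spec_down_up
  by_cases hn : n ≤ 0
  · exact down_up_nonpos n hn
  · exact main_eq n.toNat n (by omega)
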